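-- pv_equiv track=rewrite | github.com/bdaiinstitute/lottery_tickets | scripts/summarize_ticket_results.py | extract_ticket_hash
-- ===== SOURCE A (Python) =====
-- def extract_ticket_hash(folder_name):
--     """Extract ticket hash from folder name like 'libero_spatial_ticket_<hash>_n50_b10_s1619_<timestamp>'"""
--     # Handle special case for original_policy
--     if folder_name == 'original_policy' or folder_name.startswith('original_policy'):
--         return 'original_policy'
--
--     parts = folder_name.split('_')
--     # Find the hash part (32 character hex string)
--     for part in parts:
--         if len(part) == 32 and all(c in '0123456789abcdef' for c in part):
--             return part
--     return None
-- ===== SOURCE B (Python) =====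
-- def extract_ticket_hash(folder_name):
--     """Extract ticket hash: one char-level pass, no split; collect the current
--     separator-delimited run and return it when it is a 32-char hex token."""
--     if folder_name.startswith('original_policy'):
--         return 'original_policy'
--     run = []
--     for c in folder_name:
--         if c == '_':
--             if len(run) == 32 and all(ch in '0123456789abcdef' for ch in run):
--                 return ''.join(run)
--             run = []
--         else:
--             run.append(c)
--     if len(run) == 32 and all(ch in '0123456789abcdef' for ch in run):
--         return ''.join(run)
--     return None
-- ===== Notes on version B (the rewrite author's own statement) =====
-- stated objective: alternative
-- what changed: B makes a single character-level pass collecting the current separator-delimited run and returning it as soon as a 32-char hex run ends, instead of building the full split list and then scanning it.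
import Mathlib
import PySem

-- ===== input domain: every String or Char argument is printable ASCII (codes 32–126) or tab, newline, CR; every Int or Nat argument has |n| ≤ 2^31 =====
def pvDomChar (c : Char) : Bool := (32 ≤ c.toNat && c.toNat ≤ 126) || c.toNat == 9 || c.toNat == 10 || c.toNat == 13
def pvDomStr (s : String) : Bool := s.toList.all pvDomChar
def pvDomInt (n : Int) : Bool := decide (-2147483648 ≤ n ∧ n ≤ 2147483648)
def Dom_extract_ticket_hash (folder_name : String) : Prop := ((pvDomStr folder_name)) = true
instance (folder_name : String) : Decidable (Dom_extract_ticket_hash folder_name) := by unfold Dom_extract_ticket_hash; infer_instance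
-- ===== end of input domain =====

-- ===== PORT A =====
-- B changes only the traversal (single char pass instead of split-then-scan); same results, same cost.
def extractLoopA : List (List Char) → Option String
  | [] => none
  | p :: ps =>
      if p.length == 32 && p.all (fun c => "0123456789abcdef".toList.contains c) then
        some (String.ofList p)
      else extractLoopA ps

def extract_ticket_hash (folder_name : String) : Option String :=
  if folder_name == "original_policy" || PySem.Str.startswith folder_name "original_policy" then
    some "original_policy"
  else
    extractLoopA (PySem.Chars.splitOn folder_name.toList "_".toList)

-- ===== PORT B =====
def altHit (run : List Char) : Bool :=
  run.length == 32 && run.all (fun ch => "0123456789abcdef".toList.contains ch)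

def altLoop : List Char → List Char → Option String
  | [], run => if altHit run then some (String.ofList run) else none
  | c :: cs, run =>
      if c = '_' then
        if altHit run then some (String.ofList run) else altLoop cs []
      else altLoop cs (run ++ [c])

def extract_ticket_hash_alt (folder_name : String) : Option String :=
  if PySem.Str.startswith folder_name "original_policy" then some "original_policy"
  else altLoop folder_name.toList []

-- ===== PRECONDITION & SPEC =====
def Spec_extract_ticket_hash (folder_name : String) (out : Option String) : Prop := out = extract_ticket_hash_alt folder_name
instance (folder_name : String) (out : Option String) : Decidable (Spec_extract_ticket_hash folder_name out) := by unfold Spec_extract_ticket_hash; infer_instance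

-- ===== CLAIM (what is proved, stated in full; the proofs are below) =====
def Claim_equal_extract_ticket_hash : Prop := ∀ (folder_name : String), Dom_extract_ticket_hash folder_name → Spec_extract_ticket_hash folder_name (extract_ticket_hash folder_name)

-- ===== LEMMAS AND PROOFS =====

def mapHead (f : List Char → List Char) : List (List Char) → List (List Char)
  | [] => []
  | p :: ps => f p :: ps

def mySplit : List Char → List (List Char)
  | [] => [[]]
  | c :: rest => if c = '_' then [] :: mySplit rest else mapHead (fun p => c :: p) (mySplit rest)

theorem mapHead_id (xs : List (List Char)) : mapHead (fun p => [] ++ p) xs = xs := by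
  cases xs <;> simp [mapHead]

theorem mapHead_id' (xs : List (List Char)) : mapHead (fun p => p) xs = xs := by
  cases xs <;> simp [mapHead]

theorem mapHead_comp (f g : List Char → List Char) (xs : List (List Char)) :
    mapHead f (mapHead g xs) = mapHead (fun p => f (g p)) xs := by
  cases xs <;> simp [mapHead]

theorem mapHead_congr (f g : List Char → List Char) (h : ∀ p, f p = g p)
    (xs : List (List Char)) : mapHead f xs = mapHead g xs := by
  cases xs <;> simp [mapHead, h]

theorem go_zero (l cur : List Char) (acc : List (List Char)) :
    PySem.Chars.splitOn.go ['_'] 0 l cur acc = ((cur.reverse ++ l) :: acc).reverse := rfl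

theorem go_succ_nil (fuel : Nat) (cur : List Char) (acc : List (List Char)) :
    PySem.Chars.splitOn.go ['_'] (fuel + 1) [] cur acc = (cur.reverse :: acc).reverse := rfl

theorem go_succ_cons (fuel : Nat) (c : Char) (rest cur : List Char) (acc : List (List Char)) :
    PySem.Chars.splitOn.go ['_'] (fuel + 1) (c :: rest) cur acc
      = if ['_'].isPrefixOf (c :: rest) then
          PySem.Chars.splitOn.go ['_'] fuel rest [] (cur.reverse :: acc)
        else
          PySem.Chars.splitOn.go ['_'] fuel rest (c :: cur) acc := rfl

theorem splitOn_go_eq (fuel : Nat) : ∀ (l cur : List Char) (acc : List (List Char)),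
    l.length ≤ fuel →
    PySem.Chars.splitOn.go ['_'] fuel l cur acc
      = acc.reverse ++ mapHead (fun p => cur.reverse ++ p) (mySplit l) := by
  induction fuel with
  | zero =>
      intro l cur acc h
      have hl : l = [] := List.eq_nil_of_length_eq_zero (Nat.le_zero.mp h)
      subst hl
      simp [go_zero, mySplit, mapHead]
  | succ fuel ih =>
      intro l cur acc h
      cases l with
      | nil => simp [go_succ_nil, mySplit, mapHead]
      | cons c rest =>
          rw [go_succ_cons]
          by_cases hc : c = '_'
          · subst hc
            rw [if_pos (by simp [List.isPrefixOf])]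
            rw [ih rest [] (cur.reverse :: acc) (by simpa using Nat.succ_le_succ_iff.mp h)]
            simp [mySplit, mapHead]
            cases mySplit rest <;> rfl
          · rw [if_neg (by simp [List.isPrefixOf, Ne.symm hc])]
            rw [ih rest (c :: cur) acc (by simpa using Nat.succ_le_succ_iff.mp h)]
            rw [mySplit]
            rw [if_neg hc, mapHead_comp]
            congr 1
            apply mapHead_congr
            intro p
            simp

theorem splitOn_eq (l : List Char) : PySem.Chars.splitOn l ['_'] = mySplit l := by
  have := splitOn_go_eq (l.length + 1) l [] [] (by omega)
  simpa [PySem.Chars.splitOn, mapHead_id, mapHead_id'] using this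

theorem altLoop_eq (cs : List Char) : ∀ run,
    altLoop cs run = extractLoopA (mapHead (fun p => run ++ p) (mySplit cs)) := by
  induction cs with
  | nil =>
      intro run
      simp [altLoop, mySplit, mapHead, extractLoopA, altHit]
  | cons c cs ih =>
      intro run
      by_cases hc : c = '_'
      · subst hc
        rw [altLoop, mySplit]
        rw [if_pos rfl, if_pos rfl]
        rw [ih [], mapHead_id]
        show _ = extractLoopA ((run ++ []) :: mySplit cs)
        rw [extractLoopA]
        simp [altHit]
      · rw [altLoop, mySplit]
        rw [if_neg hc, if_neg hc, mapHead_comp]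
        rw [ih (run ++ [c])]
        congr 1
        apply mapHead_congr
        intro p
        simp

-- ===== VERDICT (by name: the statement is the Claim_ definition above) =====
theorem extract_ticket_hash_spec : Claim_equal_extract_ticket_hash := by
  intro s _
  unfold Spec_extract_ticket_hash extract_ticket_hash extract_ticket_hash_alt
  by_cases h : PySem.Str.startswith s "original_policy" = true
  · rw [if_pos (by rw [h, Bool.or_true]), if_pos h]
  · have hne : s ≠ "original_policy" := by
      intro he; subst he; exact h (by decide)
    rw [if_neg (by simp only [Bool.or_eq_true, beq_iff_eq]; rintro (he | hs); exacts [hne he, h hs]),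
        if_neg h]
    rw [show "_".toList = ['_'] from rfl, splitOn_eq, altLoop_eq s.toList [], mapHead_id]
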